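-- pv_equiv track=rewrite | github.com/prathamtandon/g4gproblems | Arrays/max_indices_difference.py | maximum_indices_difference
-- ===== SOURCE A (Python) =====
-- def maximum_indices_difference(list_of_numbers):
--     list_length = len(list_of_numbers)
--     min_to_my_left = [list_of_numbers[0]] * list_length
--     max_to_my_right = [list_of_numbers[list_length - 1]] * list_length
--
--     for i in range(1, list_length):
--         min_to_my_left[i] = min(list_of_numbers[i], min_to_my_left[i-1])
--
--     for j in reversed(range(0, list_length - 1)):
--         max_to_my_right[j] = max(list_of_numbers[j], max_to_my_right[j+1])
--
--     i = 0
--     j = 0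
--     max_difference = -1
--
--     while i < list_length and j < list_length:
--         if max_to_my_right[j] > min_to_my_left[i]:
--             max_difference = max(max_difference, j-i)
--             j += 1
--         else:
--             i += 1
--
--     return max_difference
-- ===== SOURCE B (Python) =====
-- def maximum_indices_difference(list_of_numbers):
--     n = len(list_of_numbers)
--     best = -1
--     for i in range(n):
--         for j in range(i, n):
--             if list_of_numbers[j] > list_of_numbers[i]:
--                 best = max(best, j - i)
--     return best
-- ===== Notes on version B (the rewrite author's own statement) =====
-- stated objective: simpler
-- what changed: Replaced the prefix-min/suffix-max auxiliary arrays and the two-pointer merge with a direct double loop over index pairs keeping the running maximum of j-i.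
import Mathlib
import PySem

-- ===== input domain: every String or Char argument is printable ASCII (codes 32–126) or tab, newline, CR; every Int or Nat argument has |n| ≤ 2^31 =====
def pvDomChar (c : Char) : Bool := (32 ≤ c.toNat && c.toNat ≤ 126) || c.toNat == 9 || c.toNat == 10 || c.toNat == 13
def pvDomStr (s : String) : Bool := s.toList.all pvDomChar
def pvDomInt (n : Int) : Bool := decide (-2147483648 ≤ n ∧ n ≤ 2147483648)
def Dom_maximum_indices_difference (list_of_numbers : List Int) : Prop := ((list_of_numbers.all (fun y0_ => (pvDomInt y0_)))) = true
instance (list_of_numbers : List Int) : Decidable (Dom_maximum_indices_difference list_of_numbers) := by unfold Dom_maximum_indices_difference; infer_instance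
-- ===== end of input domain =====

-- B replaces A's prefix-min/suffix-max arrays and two-pointer merge with a plain
-- double loop over index pairs (simpler, not faster); equivalence is about the return value.

-- ===== PORT A =====

-- the while loop of A: state (i, j, max_difference); mn = min_to_my_left, mx = max_to_my_right
def pvLoopA (mn mx : List Int) (n i j : ℕ) (d : Int) : Int :=
  if i < n ∧ j < n then
    if mx.getD j 0 > mn.getD i 0 then
      pvLoopA mn mx n i (j + 1) (max d ((j : Int) - (i : Int)))
    else
      pvLoopA mn mx n (i + 1) j d
  else d
termination_by (n - i) + (n - j)
decreasing_by all_goals omega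

def maximum_indices_difference (list_of_numbers : List Int) : Int :=
  match PySem.List.pyGet? list_of_numbers 0 with
  | none => 0  -- Python raises IndexError here (empty list); excluded by Pre_
  | some first =>
    let n := list_of_numbers.length
    -- min_to_my_left = [list_of_numbers[0]] * n ; max_to_my_right = [list_of_numbers[n-1]] * n
    let mn0 := List.replicate n first
    let mx0 := List.replicate n (list_of_numbers.getD (n - 1) 0)  -- index n-1 in range since l ≠ []
    -- for i in range(1, n): min_to_my_left[i] = min(l[i], min_to_my_left[i-1])
    let mn := (List.range' 1 (n - 1)).foldl
      (fun arr i => arr.set i (min (list_of_numbers.getD i 0) (arr.getD (i - 1) 0))) mn0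
    -- for j in reversed(range(0, n-1)): max_to_my_right[j] = max(l[j], max_to_my_right[j+1])
    let mx := (List.range' 0 (n - 1)).reverse.foldl
      (fun arr j => arr.set j (max (list_of_numbers.getD j 0) (arr.getD (j + 1) 0))) mx0
    pvLoopA mn mx n 0 0 (-1)

-- ===== PORT B =====

def maximum_indices_difference_alt (list_of_numbers : List Int) : Int :=
  let n := list_of_numbers.length
  (List.range n).foldl (fun best i =>
    (List.range' i (n - i)).foldl (fun b j =>
      if list_of_numbers.getD j 0 > list_of_numbers.getD i 0
      then max b ((j : Int) - (i : Int)) else b) best) (-1)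

-- ===== PRECONDITION & SPEC =====
-- Pre_ excludes only the empty list, on which A raises IndexError.
def Pre_maximum_indices_difference (list_of_numbers : List Int) : Prop := list_of_numbers ≠ []
instance (list_of_numbers : List Int) : Decidable (Pre_maximum_indices_difference list_of_numbers) := by unfold Pre_maximum_indices_difference; infer_instance
def pvWitness_maximum_indices_difference : List Int := [3, 1, 4]

def Spec_maximum_indices_difference (list_of_numbers : List Int) (out : Int) : Prop := out = maximum_indices_difference_alt list_of_numbers
instance (list_of_numbers : List Int) (out : Int) : Decidable (Spec_maximum_indices_difference list_of_numbers out) := by unfold Spec_maximum_indices_difference; infer_instance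

-- ===== CLAIM (what is proved, stated in full; the proofs are below) =====
def Claim_equal_maximum_indices_difference : Prop := ∀ (list_of_numbers : List Int), Dom_maximum_indices_difference list_of_numbers → Pre_maximum_indices_difference list_of_numbers → Spec_maximum_indices_difference list_of_numbers (maximum_indices_difference list_of_numbers)

-- ===== LEMMAS AND PROOFS =====

-- element access
def pvA (l : List Int) (k : ℕ) : Int := l.getD k 0

-- prefix minimum: pvPM l i = min of l[0..i]
def pvPM (l : List Int) : ℕ → Int
  | 0 => pvA l 0
  | i + 1 => min (pvA l (i + 1)) (pvPM l i)

-- suffix maximum: pvSM l j = max of l[j..n-1] (for j < n)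
def pvSM (l : List Int) (j : ℕ) : Int :=
  if j + 1 < l.length then max (pvA l j) (pvSM l (j + 1)) else pvA l j
termination_by l.length - j

lemma pvPM_le (l : List Int) {p i : ℕ} (h : p ≤ i) : pvPM l i ≤ pvA l p := by
  induction i with
  | zero => interval_cases p; simp [pvPM]
  | succ i ih =>
    rcases Nat.eq_or_lt_of_le h with rfl | h'
    · simp [pvPM]
    · calc pvPM l (i + 1) ≤ pvPM l i := by simp [pvPM]
        _ ≤ pvA l p := ih (by omega)

lemma pvPM_mem (l : List Int) (i : ℕ) : ∃ p, p ≤ i ∧ pvPM l i = pvA l p := by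
  induction i with
  | zero => exact ⟨0, le_refl _, rfl⟩
  | succ i ih =>
    obtain ⟨p, hp, he⟩ := ih
    rcases le_total (pvA l (i + 1)) (pvPM l i) with h | h
    · exact ⟨i + 1, le_refl _, by simp [pvPM, min_eq_left h]⟩
    · refine ⟨p, by omega, ?_⟩
      show min (pvA l (i + 1)) (pvPM l i) = pvA l p
      rw [min_eq_right h, he]

lemma pvSM_ge' (l : List Int) : ∀ (k j : ℕ), j + k < l.length → pvA l (j + k) ≤ pvSM l j := by
  intro k
  induction k with
  | zero =>
    intro j hj
    rw [pvSM]
    split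
    · exact le_trans (by simp) (le_max_left _ _)
    · simp
  | succ k ih =>
    intro j hj
    rw [pvSM, if_pos (by omega)]
    calc pvA l (j + (k + 1)) = pvA l ((j + 1) + k) := by ring_nf
      _ ≤ pvSM l (j + 1) := ih (j + 1) (by omega)
      _ ≤ max (pvA l j) (pvSM l (j + 1)) := le_max_right _ _

lemma pvSM_ge (l : List Int) {j q : ℕ} (h1 : j ≤ q) (h2 : q < l.length) :
    pvA l q ≤ pvSM l j := by
  have := pvSM_ge' l (q - j) j (by omega)
  rwa [show j + (q - j) = q by omega] at this

lemma pvSM_mem (l : List Int) {j : ℕ} (h : j < l.length) :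
    ∃ q, j ≤ q ∧ q < l.length ∧ pvSM l j = pvA l q := by
  obtain ⟨k, hk⟩ : ∃ k, l.length = j + 1 + k := ⟨l.length - (j+1), by omega⟩
  induction k generalizing j with
  | zero => exact ⟨j, le_refl _, h, by rw [pvSM, if_neg (by omega)]⟩
  | succ k ih =>
    obtain ⟨q, hq1, hq2, hq3⟩ := ih (j := j + 1) (by omega) (by omega)
    rcases le_total (pvSM l (j + 1)) (pvA l j) with hc | hc
    · exact ⟨j, le_refl _, h, by rw [pvSM, if_pos (by omega), max_eq_left hc]⟩
    · exact ⟨q, by omega, hq2, by rw [pvSM, if_pos (by omega), max_eq_right hc, hq3]⟩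

-- length is preserved by the set-folds
lemma pv_fold_set_length (g : List Int → ℕ → Int) :
    ∀ (r : List ℕ) (xs : List Int),
      (r.foldl (fun arr i => arr.set i (g arr i)) xs).length = xs.length := by
  intro r
  induction r with
  | nil => intro xs; rfl
  | cons a as ih => intro xs; rw [List.foldl_cons, ih]; simp

-- getD/set helpers
lemma pv_set_getD_self {xs : List Int} {i : ℕ} (h : i < xs.length) (v : Int) :
    (xs.set i v).getD i 0 = v := by
  simp [List.getD, List.getElem?_set_self', List.getElem?_eq_getElem h]

lemma pv_set_getD_ne {xs : List Int} {i k : ℕ} (h : k ≠ i) (v : Int) :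
    (xs.set i v).getD k 0 = xs.getD k 0 := by
  simp [List.getD, List.getElem?_set_ne (by omega : i ≠ k)]

-- the min_to_my_left fold computes pvPM
lemma pv_mn_fold (l : List Int) (hl : l ≠ []) (m : ℕ) (hm : m ≤ l.length - 1) :
    ∀ k ≤ m, ((List.range' 1 m).foldl
        (fun arr i => arr.set i (min (l.getD i 0) (arr.getD (i - 1) 0)))
        (List.replicate l.length (l.getD 0 0))).getD k 0 = pvPM l k := by
  have hn : 0 < l.length := List.length_pos_iff.mpr hl
  induction m with
  | zero =>
    intro k hk
    interval_cases k
    simp [List.getD, hn, pvPM, pvA]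
  | succ m ih =>
    intro k hk
    rw [List.range'_concat, List.foldl_append, List.foldl_cons, List.foldl_nil]
    simp only [show (1 + 1 * m : ℕ) = m + 1 from by omega]
    set s := (List.range' 1 m).foldl
        (fun arr i => arr.set i (min (l.getD i 0) (arr.getD (i - 1) 0)))
        (List.replicate l.length (l.getD 0 0)) with hs
    have hslen : s.length = l.length := by
      rw [hs, pv_fold_set_length (fun arr i => min (l.getD i 0) (arr.getD (i - 1) 0))]
      simp
    rcases Nat.lt_or_ge k (m + 1) with hk' | hk'
    · rw [pv_set_getD_ne (by omega)]
      exact ih (by omega) k (by omega)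
    · have hkeq : k = m + 1 := by omega
      subst hkeq
      rw [pv_set_getD_self (by omega)]
      rw [show m + 1 - 1 = m by omega, ih (by omega) m (le_refl _)]
      simp [pvPM, pvA]

-- the max_to_my_right fold computes pvSM
lemma pv_mx_fold (l : List Int) (hl : l ≠ []) (m : ℕ) (hm : m ≤ l.length - 1)
    (s : List Int) (hslen : s.length = l.length)
    (hs : ∀ k, m ≤ k → k < l.length → s.getD k 0 = pvSM l k) :
    ∀ k < l.length, ((List.range' 0 m).reverse.foldl
        (fun arr j => arr.set j (max (l.getD j 0) (arr.getD (j + 1) 0))) s).getD k 0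
      = pvSM l k := by
  have hn : 0 < l.length := List.length_pos_iff.mpr hl
  induction m generalizing s with
  | zero => intro k hk; simpa using hs k (by omega) hk
  | succ m ih =>
    intro k hk
    rw [List.range'_concat, List.reverse_append, List.reverse_cons, List.reverse_nil,
        List.nil_append, List.cons_append, List.foldl_cons]
    simp only [show (0 + 1 * m : ℕ) = m from by omega]
    have hmn : m < l.length := by omega
    refine ih (by omega) _ (by simp [hslen]) ?_ k hk
    intro k' hk1 hk2
    rcases Nat.eq_or_lt_of_le hk1 with heq | h'
    · subst heq
      rw [pv_set_getD_self (by omega)]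
      rw [pvSM, if_pos (by omega)]
      rw [hs (m + 1) (by omega) (by omega)]
      rfl
    · rw [pv_set_getD_ne (by omega), hs k' (by omega) hk2]

-- ---- properties of B's port ----

-- generic conditional-max fold lemmas
lemma pv_cmax_ge {α : Type} (P : α → Prop) [DecidablePred P] (f : α → Int) :
    ∀ (xs : List α) (d : Int),
      d ≤ xs.foldl (fun b x => if P x then max b (f x) else b) d := by
  intro xs
  induction xs with
  | nil => intro d; simp
  | cons a as ih =>
    intro d
    simp only [List.foldl_cons]
    split
    · exact le_trans (le_max_left _ _) (ih _)
    · exact ih d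

lemma pv_cmax_mem {α : Type} (P : α → Prop) [DecidablePred P] (f : α → Int) :
    ∀ (xs : List α) (d : Int) (x : α), x ∈ xs → P x →
      f x ≤ xs.foldl (fun b x => if P x then max b (f x) else b) d := by
  intro xs
  induction xs with
  | nil => intro d x hx; simp at hx
  | cons a as ih =>
    intro d x hx hP
    simp only [List.foldl_cons]
    rcases List.mem_cons.mp hx with rfl | hx'
    · rw [if_pos hP]
      exact le_trans (le_max_right _ _) (pv_cmax_ge P f as _)
    · split
      · exact ih _ x hx' hP
      · exact ih _ x hx' hP

lemma pv_cmax_le {α : Type} (P : α → Prop) [DecidablePred P] (f : α → Int) :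
    ∀ (xs : List α) (d e : Int), d ≤ e → (∀ x ∈ xs, P x → f x ≤ e) →
      xs.foldl (fun b x => if P x then max b (f x) else b) d ≤ e := by
  intro xs
  induction xs with
  | nil => intro d e hd _; simpa using hd
  | cons a as ih =>
    intro d e hd hall
    simp only [List.foldl_cons]
    split
    · exact ih _ _ (max_le hd (hall a (List.mem_cons_self) (by assumption)))
        (fun x hx => hall x (List.mem_cons_of_mem _ hx))
    · exact ih _ _ hd (fun x hx => hall x (List.mem_cons_of_mem _ hx))

-- rewrite B's port body as nested conditional-max folds
lemma pv_alt_eq (l : List Int) :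
    maximum_indices_difference_alt l
      = (List.range l.length).foldl (fun best i =>
          (List.range' i (l.length - i)).foldl (fun b j =>
            if pvA l j > pvA l i then max b ((j : Int) - (i : Int)) else b) best) (-1) := rfl

lemma pv_outer_mono (l : List Int) :
    ∀ (ys : List ℕ) (d e : Int), d ≤ e →
      d ≤ ys.foldl (fun best i =>
        (List.range' i (l.length - i)).foldl (fun b j =>
          if pvA l j > pvA l i then max b ((j : Int) - (i : Int)) else b) best) e := by
  intro ys
  induction ys with
  | nil => intro d e h; simpa using h
  | cons b bs ihb =>
    intro d e h
    simp only [List.foldl_cons]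
    exact ihb _ _ (le_trans h (pv_cmax_ge _ _ _ _))

lemma pv_alt_ge_neg_one (l : List Int) : -1 ≤ maximum_indices_difference_alt l := by
  rw [pv_alt_eq]
  exact pv_outer_mono l _ (-1) (-1) (le_refl _)

lemma pv_alt_ge_pair (l : List Int) {p q : ℕ} (hpq : p ≤ q) (hq : q < l.length)
    (hv : pvA l q > pvA l p) : (q : Int) - (p : Int) ≤ maximum_indices_difference_alt l := by
  rw [pv_alt_eq]
  have hp : p ∈ List.range l.length := List.mem_range.mpr (by omega)
  -- generic: outer fold dominates the inner fold at any member
  have outer : ∀ (xs : List ℕ) (d : Int), p ∈ xs →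
      (q:Int) - (p:Int) ≤ xs.foldl (fun best i =>
        (List.range' i (l.length - i)).foldl (fun b j =>
          if pvA l j > pvA l i then max b ((j : Int) - (i : Int)) else b) best) d := by
    intro xs
    induction xs with
    | nil => intro d h; simp at h
    | cons a as ih =>
      intro d h
      simp only [List.foldl_cons]
      rcases List.mem_cons.mp h with rfl | h'
      · -- inner fold at i = p contains j = q
        have hqmem : q ∈ List.range' p (l.length - p) := by
          rw [List.mem_range']; exact ⟨q - p, by omega, by omega⟩
        have step := pv_cmax_mem (fun j => pvA l j > pvA l p)
          (fun j => (j : Int) - (p : Int)) (List.range' p (l.length - p)) d q hqmem hv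
        exact pv_outer_mono l as _ _ step
      · exact ih _ h'
  exact outer _ _ hp

lemma pv_alt_le (l : List Int) (e : Int) (he : -1 ≤ e)
    (hall : ∀ p q : ℕ, p ≤ q → q < l.length → pvA l q > pvA l p → (q:Int) - (p:Int) ≤ e) :
    maximum_indices_difference_alt l ≤ e := by
  rw [pv_alt_eq]
  have main : ∀ (xs : List ℕ) (d : Int), d ≤ e → (∀ i ∈ xs, i < l.length) →
      xs.foldl (fun best i =>
        (List.range' i (l.length - i)).foldl (fun b j =>
          if pvA l j > pvA l i then max b ((j : Int) - (i : Int)) else b) best) d ≤ e := by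
    intro xs
    induction xs with
    | nil => intro d hd _; simpa using hd
    | cons a as ih =>
      intro d hd hmem
      simp only [List.foldl_cons]
      apply ih _ _ (fun i hi => hmem i (List.mem_cons_of_mem _ hi))
      apply pv_cmax_le _ _ _ _ _ hd
      intro j hj hP
      rw [List.mem_range'] at hj
      obtain ⟨k, hk, rfl⟩ := hj
      simp only [Nat.one_mul] at hP hk ⊢
      have ha : a < l.length := hmem a List.mem_cons_self
      exact hall a (a + k) (by omega) (by omega) hP
  exact main _ _ he (fun i hi => List.mem_range.mp hi)

-- ---- main two-pointer lemma ----

lemma pv_loop_eq (l : List Int) (_hl : l ≠ []) (mn mx : List Int)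
    (hmn : ∀ k < l.length, mn.getD k 0 = pvPM l k)
    (hmx : ∀ k < l.length, mx.getD k 0 = pvSM l k) :
    ∀ (fuel i j : ℕ) (d : Int), (l.length - i) + (l.length - j) ≤ fuel →
      -1 ≤ d → d ≤ maximum_indices_difference_alt l →
      (∀ p q : ℕ, p ≤ q → q < l.length → pvA l q > pvA l p →
        ((q:Int) - (p:Int) ≤ d ∨ (i ≤ p ∧ j ≤ q))) →
      pvLoopA mn mx l.length i j d = maximum_indices_difference_alt l := by
  intro fuel
  induction fuel with
  | zero =>
    intro i j d hfuel hd1 hd2 hinv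
    have hi : ¬ (i < l.length ∧ j < l.length) := by omega
    rw [pvLoopA, if_neg hi]
    -- loop is over: no valid pair can satisfy the right disjunct
    apply le_antisymm hd2
    apply pv_alt_le l d hd1
    intro p q hpq hq hv
    rcases hinv p q hpq hq hv with h | ⟨h1, h2⟩
    · exact h
    · omega
  | succ fuel ih =>
    intro i j d hfuel hd1 hd2 hinv
    rw [pvLoopA]
    by_cases hij : i < l.length ∧ j < l.length
    · rw [if_pos hij]
      obtain ⟨hi, hj⟩ := hij
      rw [hmx j hj, hmn i hi]
      by_cases hc : mx.getD j 0 > mn.getD i 0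
      all_goals rw [hmx j hj, hmn i hi] at hc
      · rw [if_pos hc]
        -- recorded value j - i is ≤ alt
        have hji : (j : Int) - (i : Int) ≤ maximum_indices_difference_alt l := by
          rcases Nat.lt_or_ge j i with hlt | hge
          · have := pv_alt_ge_neg_one l; omega
          · obtain ⟨p, hp, hpe⟩ := pvPM_mem l i
            obtain ⟨q, hq1, hq2, hqe⟩ := pvSM_mem l hj
            have hv : pvA l q > pvA l p := by rw [← hpe, ← hqe]; exact hc
            have := pv_alt_ge_pair l (p := p) (q := q) (by omega) hq2 hv
            omega
        apply ih i (j + 1) _ (by omega) (by omega) (by omega)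
        intro p q hpq hq hv
        rcases hinv p q hpq hq hv with h | ⟨h1, h2⟩
        · left; omega
        · rcases Nat.lt_or_ge q (j + 1) with hlt | hge
          · left
            have hqj : q = j := by omega
            subst hqj
            omega
          · right; omega
      · rw [if_neg hc]
        apply ih (i + 1) j d (by omega) hd1 hd2
        intro p q hpq hq hv
        rcases hinv p q hpq hq hv with h | ⟨h1, h2⟩
        · left; exact h
        · rcases Nat.lt_or_ge p (i + 1) with hlt | hge
          · -- p = i: contradiction with the failed comparison
            exfalso
            have hpi : p = i := by omega
            subst hpi
            have h1' : pvA l q ≤ pvSM l j := pvSM_ge l h2 hq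
            have h2' : pvPM l p ≤ pvA l p := pvPM_le l (le_refl p)
            push Not at hc
            omega
          · right; omega
    · rw [if_neg hij]
      apply le_antisymm hd2
      apply pv_alt_le l d hd1
      intro p q hpq hq hv
      rcases hinv p q hpq hq hv with h | ⟨h1, h2⟩
      · exact h
      · omega

-- ===== VERDICT (by name: the statement is the Claim_ definition above) =====
theorem maximum_indices_difference_spec : Claim_equal_maximum_indices_difference := by
  intro l _hdom hpre
  unfold Spec_maximum_indices_difference
  unfold Pre_maximum_indices_difference at hpre
  have hn : 0 < l.length := List.length_pos_iff.mpr hpre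
  obtain ⟨x, hx⟩ : ∃ x, PySem.List.pyGet? l 0 = some x := by
    cases l with
    | nil => exact absurd rfl hpre
    | cons a as => exact ⟨a, by simp⟩
  have hx0 : x = l.getD 0 0 := by
    rw [PySem.List.pyGet?_zero] at hx
    cases l with
    | nil => simp at hx
    | cons a as => simp at hx; simp [hx]
  unfold maximum_indices_difference
  rw [hx, hx0]
  have hmn : ∀ k < l.length,
      ((List.range' 1 (l.length - 1)).foldl
        (fun arr i => arr.set i (min (l.getD i 0) (arr.getD (i - 1) 0)))
        (List.replicate l.length (l.getD 0 0))).getD k 0 = pvPM l k := by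
    intro k hk
    exact pv_mn_fold l hpre (l.length - 1) (le_refl _) k (by omega)
  have hmx : ∀ k < l.length,
      ((List.range' 0 (l.length - 1)).reverse.foldl
        (fun arr j => arr.set j (max (l.getD j 0) (arr.getD (j + 1) 0)))
        (List.replicate l.length (l.getD (l.length - 1) 0))).getD k 0 = pvSM l k := by
    intro k hk
    refine pv_mx_fold l hpre (l.length - 1) (le_refl _) _ (by simp) ?_ k hk
    intro k' hk1 hk2
    have hk' : k' = l.length - 1 := by omega
    subst hk'
    have hrep : (List.replicate l.length (l.getD (l.length - 1) 0)).getD (l.length - 1) 0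
        = l.getD (l.length - 1) 0 :=
      List.getD_replicate (x := l.getD (l.length - 1) 0) (y := 0) (i := l.length - 1)
        (n := l.length) (by omega)
    rw [hrep, pvSM, if_neg (by omega)]
    rfl
  exact pv_loop_eq l hpre _ _ hmn hmx (2 * l.length) 0 0 (-1) (by omega) (le_refl _)
    (pv_alt_ge_neg_one l) (fun p q _ _ _ => Or.inr ⟨Nat.zero_le _, Nat.zero_le _⟩)
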